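-- pv_equiv track=rewrite | github.com/google/gdata-python-client | src/gdata/gauth.py | get_captcha_challenge
-- ===== SOURCE A (Python) =====
-- def get_captcha_challenge(http_body,
--     captcha_base_url='http://www.google.com/accounts/'):
--   """Returns the URL and token for a CAPTCHA challenge issued by the server.
--
--   Args:
--     http_body: str The body of the HTTP response from the server which
--         contains the CAPTCHA challenge.
--     captcha_base_url: str This function returns a full URL for viewing the
--         challenge image which is built from the server's response. This
--         base_url is used as the beginning of the URL because the server
--         only provides the end of the URL. For example the server provides
--         'Captcha?ctoken=Hi...N' and the URL for the image is
--         'http://www.google.com/accounts/Captcha?ctoken=Hi...N'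
--
--   Returns:
--     A dictionary containing the information needed to repond to the CAPTCHA
--     challenge, the image URL and the ID token of the challenge. The
--     dictionary is in the form:
--     {'token': string identifying the CAPTCHA image,
--      'url': string containing the URL of the image}
--     Returns None if there was no CAPTCHA challenge in the response.
--   """
--   contains_captcha_challenge = False
--   captcha_parameters = {}
--   for response_line in http_body.splitlines():
--     if response_line.startswith('Error=CaptchaRequired'):
--       contains_captcha_challenge = True
--     elif response_line.startswith('CaptchaToken='):
--       # Strip off the leading CaptchaToken=
--       captcha_parameters['token'] = response_line[13:]
--     elif response_line.startswith('CaptchaUrl='):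
--       captcha_parameters['url'] = '%s%s' % (captcha_base_url,
--           response_line[11:])
--   if contains_captcha_challenge:
--     return captcha_parameters
--   else:
--     return None
-- ===== SOURCE B (Python) =====
-- def get_captcha_challenge(http_body,
--     captcha_base_url='http://www.google.com/accounts/'):
--   # Parse the body once into key/value pairs (split each line on its first
--   # '='; lines without '=' are skipped), then query the table.
--   pairs = []
--   for line in http_body.splitlines():
--     key, sep, value = line.partition('=')
--     if sep:
--       pairs.append((key, value))
--   if not any(k == 'Error' and v.startswith('CaptchaRequired')
--              for k, v in pairs):
--     return None
--   fields = {}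
--   for k, v in pairs:
--     if k == 'CaptchaToken':
--       fields['token'] = v
--     elif k == 'CaptchaUrl':
--       fields['url'] = captcha_base_url + v
--   return fields
-- ===== Notes on version B (the rewrite author's own statement) =====
-- stated objective: idiomatic
-- what changed: B parses the body once into (key, value) pairs by splitting each line at its first equals sign, then answers by queries over that table (an any-scan for the Error flag and a fold assembling the result dict), instead of A's single loop of prefix tests with slicing.
import Mathlib
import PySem

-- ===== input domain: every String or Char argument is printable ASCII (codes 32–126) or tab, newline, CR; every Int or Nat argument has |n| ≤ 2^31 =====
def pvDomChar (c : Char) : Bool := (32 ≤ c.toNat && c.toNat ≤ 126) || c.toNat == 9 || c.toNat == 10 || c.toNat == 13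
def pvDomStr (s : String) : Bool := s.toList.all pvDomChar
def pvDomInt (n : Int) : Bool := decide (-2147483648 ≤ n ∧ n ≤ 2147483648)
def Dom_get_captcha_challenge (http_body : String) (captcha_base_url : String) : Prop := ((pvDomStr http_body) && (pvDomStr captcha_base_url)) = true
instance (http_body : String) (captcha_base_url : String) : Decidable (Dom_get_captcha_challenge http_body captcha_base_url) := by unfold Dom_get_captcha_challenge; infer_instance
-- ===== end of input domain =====

-- B parses the body once into (key, value) pairs (split on the first '='),
-- then answers by queries over that table; same return value as A.


-- ===== PORT A =====
def get_captcha_challenge (http_body : String) (captcha_base_url : String) : Option (List (String × String)) :=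
  let st := (PySem.Str.splitlines http_body).foldl
    (fun (st : Bool × PySem.Dict String String) (response_line : String) =>
      if PySem.Str.startswith response_line "Error=CaptchaRequired" then
        (true, st.2)
      else if PySem.Str.startswith response_line "CaptchaToken=" then
        (st.1, st.2.insert "token" (PySem.Str.slice response_line (some 13) none))
      else if PySem.Str.startswith response_line "CaptchaUrl=" then
        -- '%s%s' % (a, b) is string concatenation: exact as append of code points
        (st.1, st.2.insert "url"
          (String.ofList (captcha_base_url.toList ++ (PySem.Str.slice response_line (some 11) none).toList)))
      else st)
    ((false : Bool), (PySem.Dict.empty : PySem.Dict String String))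
  if st.1 then some st.2.items else none

-- ===== PORT B =====
-- hand port of line.partition('=') + `if sep:` for the one-char separator '=':
-- some (head, tail) at the FIRST '=', none when the line has no '=' (exact)
def gcSplitEq : List Char → Option (List Char × List Char)
  | [] => none
  | c :: rest =>
    if c = '=' then some ([], rest)
    else
      match gcSplitEq rest with
      | none => none
      | some (k, v) => some (c :: k, v)

def gcParseLine (line : String) : Option (String × String) :=
  match gcSplitEq line.toList with
  | none => none
  | some (k, v) => some (String.ofList k, String.ofList v)

def get_captcha_challenge_alt (http_body : String) (captcha_base_url : String) : Option (List (String × String)) :=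
  let pairs := (PySem.Str.splitlines http_body).foldl
    (fun (acc : List (String × String)) (line : String) =>
      match gcParseLine line with
      | some p => acc ++ [p]
      | none => acc) []
  if !(pairs.any (fun p => p.1 == "Error" && PySem.Str.startswith p.2 "CaptchaRequired")) then
    none
  else
    some ((pairs.foldl
      (fun (d : PySem.Dict String String) (p : String × String) =>
        if p.1 == "CaptchaToken" then d.insert "token" p.2
        else if p.1 == "CaptchaUrl" then
          d.insert "url" (String.ofList (captcha_base_url.toList ++ p.2.toList))
        else d)
      (PySem.Dict.empty : PySem.Dict String String)).items)

-- ===== PRECONDITION & SPEC =====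
def Spec_get_captcha_challenge (http_body : String) (captcha_base_url : String) (out : Option (List (String × String))) : Prop := out = get_captcha_challenge_alt http_body captcha_base_url
instance (http_body : String) (captcha_base_url : String) (out : Option (List (String × String))) : Decidable (Spec_get_captcha_challenge http_body captcha_base_url out) := by unfold Spec_get_captcha_challenge; infer_instance

-- ===== CLAIM (what is proved, stated in full; the proofs are below) =====
def Claim_equal_get_captcha_challenge : Prop := ∀ (http_body : String) (captcha_base_url : String), Dom_get_captcha_challenge http_body captcha_base_url → Spec_get_captcha_challenge http_body captcha_base_url (get_captcha_challenge http_body captcha_base_url)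

-- ===== LEMMAS AND PROOFS =====

-- named forms of the two loop bodies and of the Error test (proof-side only)
def gcStepA (captcha_base_url : String) (st : Bool × PySem.Dict String String)
    (response_line : String) : Bool × PySem.Dict String String :=
  if PySem.Str.startswith response_line "Error=CaptchaRequired" then
    (true, st.2)
  else if PySem.Str.startswith response_line "CaptchaToken=" then
    (st.1, st.2.insert "token" (PySem.Str.slice response_line (some 13) none))
  else if PySem.Str.startswith response_line "CaptchaUrl=" then
    (st.1, st.2.insert "url"
      (String.ofList (captcha_base_url.toList ++ (PySem.Str.slice response_line (some 11) none).toList)))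
  else st

def gcStepB (captcha_base_url : String) (d : PySem.Dict String String)
    (p : String × String) : PySem.Dict String String :=
  if p.1 == "CaptchaToken" then d.insert "token" p.2
  else if p.1 == "CaptchaUrl" then
    d.insert "url" (String.ofList (captcha_base_url.toList ++ p.2.toList))
  else d

def gcErrP (p : String × String) : Bool :=
  p.1 == "Error" && PySem.Str.startswith p.2 "CaptchaRequired"

theorem gcSplitEq_none {cs : List Char} (h : gcSplitEq cs = none) : '=' ∉ cs := by
  induction cs with
  | nil => simp
  | cons c rest ih =>
    by_cases hc : c = '='
    · simp [gcSplitEq, hc] at h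
    · simp only [gcSplitEq, if_neg hc] at h
      cases hk : gcSplitEq rest with
      | none =>
        simp only [List.mem_cons, not_or]
        exact ⟨fun h' => hc h'.symm, ih hk⟩
      | some kv => rw [hk] at h; simp at h

theorem gcSplitEq_some {cs k v : List Char} (h : gcSplitEq cs = some (k, v)) :
    cs = k ++ '=' :: v ∧ '=' ∉ k := by
  induction cs generalizing k v with
  | nil => simp [gcSplitEq] at h
  | cons c rest ih =>
    by_cases hc : c = '='
    · simp [gcSplitEq, hc] at h
      obtain ⟨hk, hv⟩ := h
      subst hk; subst hv; simp [hc]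
    · simp only [gcSplitEq, if_neg hc] at h
      cases hk : gcSplitEq rest with
      | none => rw [hk] at h; simp at h
      | some kv =>
        rw [hk] at h
        obtain ⟨k', v'⟩ := kv
        simp at h
        obtain ⟨hk1, hv1⟩ := h
        obtain ⟨h1, h2⟩ := ih hk
        subst hk1; subst hv1
        refine ⟨by simp [h1], ?_⟩
        simp only [List.mem_cons, not_or]
        exact ⟨fun h' => hc h'.symm, h2⟩

-- the first '=' determines the split uniquely
theorem gcFirstEq : ∀ (k kp v w : List Char), '=' ∉ k → '=' ∉ kp →
    k ++ '=' :: v = kp ++ '=' :: w → k = kp ∧ v = w := by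
  intro k
  induction k with
  | nil =>
    intro kp v w _ hkp h
    cases kp with
    | nil => simpa using h
    | cons c kp' =>
      simp at h
      obtain ⟨h1, _⟩ := h
      exact absurd (by simp [← h1]) hkp
  | cons c k' ih =>
    intro kp v w hk hkp h
    cases kp with
    | nil =>
      simp at h
      obtain ⟨h1, _⟩ := h
      exact absurd (by simp [h1]) hk
    | cons c' kp' =>
      simp at h
      obtain ⟨h1, h2⟩ := h
      have := ih kp' v w (fun hm => hk (by simp [hm])) (fun hm => hkp (by simp [hm])) h2
      exact ⟨by simp [h1, this.1], this.2⟩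

-- startswith on a line that splits as k ++ '=' :: v, for a pattern kp ++ '=' :: sp
theorem gcStartswith_pattern {k v : List Char} (kp sp : List Char)
    (hk : '=' ∉ k) (hkp : '=' ∉ kp) :
    PySem.Chars.startswith (k ++ '=' :: v) (kp ++ '=' :: sp) =
      (decide (k = kp) && PySem.Chars.startswith v sp) := by
  by_cases hkk : k = kp
  · subst hkk
    cases hs : PySem.Chars.startswith v sp with
    | true =>
      simp only [decide_true, Bool.and_true]
      rw [PySem.Chars.startswith_iff] at hs ⊢
      obtain ⟨t, ht⟩ := hs
      exact ⟨t, by simp [← ht]⟩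
    | false =>
      simp only [decide_true, Bool.and_false]
      rw [Bool.eq_false_iff]
      intro hpre
      rw [PySem.Chars.startswith_iff] at hpre
      obtain ⟨t, ht⟩ := hpre
      have h2 := gcFirstEq k k (sp ++ t) v hk hk (by simpa using ht)
      rw [Bool.eq_false_iff] at hs
      exact hs ((PySem.Chars.startswith_iff _ _).mpr ⟨t, h2.2⟩)
  · simp only [hkk, decide_false, Bool.false_and]
    rw [Bool.eq_false_iff]
    intro hpre
    rw [PySem.Chars.startswith_iff] at hpre
    obtain ⟨t, ht⟩ := hpre
    exact hkk (gcFirstEq kp k (sp ++ t) v hkp hk (by simpa using ht)).1.symm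

theorem gcStartswith_no_eq {cs : List Char} (kp sp : List Char)
    (h : '=' ∉ cs) : PySem.Chars.startswith cs (kp ++ '=' :: sp) = false := by
  rw [Bool.eq_false_iff]
  intro hpre
  rw [PySem.Chars.startswith_iff] at hpre
  obtain ⟨t, ht⟩ := hpre
  exact h (by rw [← ht]; simp)

-- B's pairs loop appends: it is the filterMap of gcParseLine
theorem gcPairs_eq (lines : List String) : ∀ acc : List (String × String),
    lines.foldl (fun acc line =>
      match gcParseLine line with
      | some p => acc ++ [p]
      | none => acc) acc = acc ++ lines.filterMap gcParseLine := by
  induction lines with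
  | nil => simp
  | cons l rest ih =>
    intro acc
    cases hp : gcParseLine l with
    | none => simp [List.foldl_cons, hp, ih]
    | some p => simp [List.foldl_cons, hp, ih]

-- the three literal patterns, decomposed
theorem gcPatError : "Error=CaptchaRequired".toList = "Error".toList ++ '=' :: "CaptchaRequired".toList := by decide
theorem gcPatToken : "CaptchaToken=".toList = "CaptchaToken".toList ++ '=' :: ([] : List Char) := by decide
theorem gcPatUrl : "CaptchaUrl=".toList = "CaptchaUrl".toList ++ '=' :: ([] : List Char) := by decide

theorem gcBeqOfList (k : List Char) (s : String) :
    (String.ofList k == s) = decide (k = s.toList) := by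
  cases hks : decide (k = s.toList) with
  | true =>
    simp only [decide_eq_true_eq] at hks
    subst hks
    simp [String.ofList_toList]
  | false =>
    have hne := of_decide_eq_false hks
    simp only [beq_eq_false_iff_ne, ne_eq]
    intro h'; exact hne (by rw [← h']; simp)

-- main invariant: A's fold state equals B's queries over the parsed pairs
theorem gcMain (captcha_base_url : String) (lines : List String) :
    ∀ (flag : Bool) (d : PySem.Dict String String),
    lines.foldl (gcStepA captcha_base_url) (flag, d) =
    ((flag || (lines.filterMap gcParseLine).any gcErrP),
     (lines.filterMap gcParseLine).foldl (gcStepB captcha_base_url) d) := by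
  induction lines with
  | nil => intro flag d; simp
  | cons line rest ih =>
    intro flag d
    rw [List.foldl_cons]
    cases hsp : gcSplitEq line.toList with
    | none =>
      have hne : '=' ∉ line.toList := gcSplitEq_none hsp
      have h1 : PySem.Str.startswith line "Error=CaptchaRequired" = false := by
        rw [PySem.Str.startswith_eq, gcPatError]; exact gcStartswith_no_eq _ _ hne
      have h2 : PySem.Str.startswith line "CaptchaToken=" = false := by
        rw [PySem.Str.startswith_eq, gcPatToken]; exact gcStartswith_no_eq _ _ hne
      have h3 : PySem.Str.startswith line "CaptchaUrl=" = false := by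
        rw [PySem.Str.startswith_eq, gcPatUrl]; exact gcStartswith_no_eq _ _ hne
      have hp : gcParseLine line = none := by simp [gcParseLine, hsp]
      have hstep : gcStepA captcha_base_url (flag, d) line = (flag, d) := by
        simp only [gcStepA]; rw [h1, h2, h3]; simp
      rw [hstep, List.filterMap_cons, hp]
      exact ih flag d
    | some kv =>
      obtain ⟨k, v⟩ := kv
      obtain ⟨hcs, hknoeq⟩ := gcSplitEq_some hsp
      have hp : gcParseLine line = some (String.ofList k, String.ofList v) := by
        simp [gcParseLine, hsp]
      have h1 : PySem.Str.startswith line "Error=CaptchaRequired" =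
          (decide (k = "Error".toList) && PySem.Chars.startswith v "CaptchaRequired".toList) := by
        rw [PySem.Str.startswith_eq, gcPatError, hcs]
        exact gcStartswith_pattern _ _ hknoeq (by decide)
      have h2 : PySem.Str.startswith line "CaptchaToken=" = decide (k = "CaptchaToken".toList) := by
        rw [PySem.Str.startswith_eq, gcPatToken, hcs,
          gcStartswith_pattern _ _ hknoeq (by decide)]
        simp [PySem.Chars.startswith]
      have h3 : PySem.Str.startswith line "CaptchaUrl=" = decide (k = "CaptchaUrl".toList) := by
        rw [PySem.Str.startswith_eq, gcPatUrl, hcs,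
          gcStartswith_pattern _ _ hknoeq (by decide)]
        simp [PySem.Chars.startswith]
      simp at h1 h2 h3
      rw [List.filterMap_cons, hp, List.any_cons, List.foldl_cons]
      by_cases hkE : k = "Error".toList
      · subst hkE
        have herr : gcErrP (String.ofList "Error".toList, String.ofList v) =
            PySem.Chars.startswith v "CaptchaRequired".toList := by
          simp [gcErrP]
        have hB : gcStepB captcha_base_url d (String.ofList "Error".toList, String.ofList v) = d := by
          simp only [gcStepB, gcBeqOfList]; simp
        cases hvC : PySem.Chars.startswith v "CaptchaRequired".toList with
        | true =>
          have hstep : gcStepA captcha_base_url (flag, d) line = (true, d) := by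
            have hvC' := hvC
            simp at hvC'
            simp only [gcStepA]; simp [h1, hvC']
          rw [hstep, ih, herr, hB, hvC]
          simp
        | false =>
          have hstep : gcStepA captcha_base_url (flag, d) line = (flag, d) := by
            have hvC' := hvC
            simp at hvC'
            simp only [gcStepA]; simp [h1, h2, h3, hvC']
          rw [hstep, ih, herr, hB, hvC]
          simp
      · by_cases hkT : k = "CaptchaToken".toList
        · subst hkT
          have hdrop : PySem.Str.slice line (some 13) none = String.ofList v := by
            apply String.toList_inj.mp
            rw [PySem.Str.toList_slice, PySem.Chars.slice_eq_listSlice,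
              PySem.List.slice_from _ (by norm_num), hcs]
            simp
          have herr : gcErrP (String.ofList "CaptchaToken".toList, String.ofList v) = false := by
            simp only [gcErrP, gcBeqOfList]; simp
          have hB : gcStepB captcha_base_url d (String.ofList "CaptchaToken".toList, String.ofList v) =
              d.insert "token" (String.ofList v) := by
            simp only [gcStepB, gcBeqOfList]; simp
          have hstep : gcStepA captcha_base_url (flag, d) line =
              (flag, d.insert "token" (String.ofList v)) := by
            simp only [gcStepA]
            rw [hdrop]
            simp [h1, h2]
          rw [hstep, ih, herr, hB]
          simp
        · by_cases hkU : k = "CaptchaUrl".toList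
          · subst hkU
            have hdrop : (PySem.Str.slice line (some 11) none).toList = v := by
              rw [PySem.Str.toList_slice, PySem.Chars.slice_eq_listSlice,
                PySem.List.slice_from _ (by norm_num), hcs]
              simp
            have herr : gcErrP (String.ofList "CaptchaUrl".toList, String.ofList v) = false := by
              simp only [gcErrP, gcBeqOfList]; simp
            have hB : gcStepB captcha_base_url d (String.ofList "CaptchaUrl".toList, String.ofList v) =
                d.insert "url" (String.ofList (captcha_base_url.toList ++ v)) := by
              simp only [gcStepB, gcBeqOfList]; simp
            have hstep : gcStepA captcha_base_url (flag, d) line =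
                (flag, d.insert "url" (String.ofList (captcha_base_url.toList ++ v))) := by
              simp only [gcStepA]
              rw [show String.ofList (captcha_base_url.toList ++ (PySem.Str.slice line (some 11) none).toList) =
                String.ofList (captcha_base_url.toList ++ v) by rw [hdrop]]
              simp [h1, h2, h3]
            rw [hstep, ih, herr, hB]
            simp
          · simp at hkE hkT hkU
            have herr : gcErrP (String.ofList k, String.ofList v) = false := by
              simp only [gcErrP, gcBeqOfList]; simp [hkE]
            have hB : gcStepB captcha_base_url d (String.ofList k, String.ofList v) = d := by
              simp only [gcStepB, gcBeqOfList]; simp [hkT, hkU]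
            have hstep : gcStepA captcha_base_url (flag, d) line = (flag, d) := by
              simp only [gcStepA]; simp [h1, h2, h3, hkE, hkT, hkU]
            rw [hstep, ih, herr, hB]
            simp

-- ===== VERDICT (by name: the statement is the Claim_ definition above) =====
theorem get_captcha_challenge_spec : Claim_equal_get_captcha_challenge := by
  intro http_body captcha_base_url _
  show get_captcha_challenge http_body captcha_base_url =
    get_captcha_challenge_alt http_body captcha_base_url
  have hA : get_captcha_challenge http_body captcha_base_url =
      (let st := (PySem.Str.splitlines http_body).foldl (gcStepA captcha_base_url)
        ((false : Bool), (PySem.Dict.empty : PySem.Dict String String));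
       if st.1 then some st.2.items else none) := rfl
  have hB : get_captcha_challenge_alt http_body captcha_base_url =
      (let pairs := (PySem.Str.splitlines http_body).foldl
        (fun (acc : List (String × String)) (line : String) =>
          match gcParseLine line with
          | some p => acc ++ [p]
          | none => acc) [];
       if !(pairs.any gcErrP) then none
       else some ((pairs.foldl (gcStepB captcha_base_url)
         (PySem.Dict.empty : PySem.Dict String String)).items)) := rfl
  rw [hA, hB]
  simp only [gcPairs_eq _ [], List.nil_append,
    gcMain captcha_base_url (PySem.Str.splitlines http_body) false PySem.Dict.empty,
    Bool.false_or]
  cases hany : (((PySem.Str.splitlines http_body).filterMap gcParseLine).any gcErrP) with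
  | true => simp
  | false => simp
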